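-- pv_equiv track=rewrite | github.com/Leapense/problems | 29991번： Fatigue-Fighting Vacation/Fatigue-Fighting Vacation.py | count_activities
-- ===== SOURCE A (Python) =====
-- def count_activities(D, C, R, tiring_activities, invigorating_activities):
--     total_activities = 0
--     t_idx = 0
--     r_idx = 0
--
--     while t_idx < C or r_idx < R:
--         if t_idx < C and tiring_activities[t_idx] <= D:
--             D -= tiring_activities[t_idx]
--             t_idx += 1
--             total_activities += 1
--         elif r_idx < R:
--             D += invigorating_activities[r_idx]
--             r_idx += 1
--             total_activities += 1
--         else:
--             break
--
--     return total_activities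
-- ===== SOURCE B (Python) =====
-- def count_activities(D, C, R, tiring_activities, invigorating_activities):
--     Cn = C if C > 0 else 0
--     Rn = R if R > 0 else 0
--     # prefix sums: sumT[t] = total fatigue of the first t tiring activities,
--     # sumI[r] = total restoration of the first r invigorating activities
--     sumT = [0]
--     s = 0
--     for i in range(Cn):
--         s += tiring_activities[i]
--         sumT.append(s)
--     sumI = [0]
--     s = 0
--     for i in range(Rn):
--         s += invigorating_activities[i]
--         sumI.append(s)
--     # tiring activity t is doable once the consumed restoration sumI[r] reaches
--     # the cumulative threshold sumT[t+1] - D; the pointer r only moves forward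
--     r = 0
--     for t in range(Cn):
--         X = sumT[t + 1] - D
--         while r < Rn and sumI[r] < X:
--             r += 1
--         if sumI[r] < X:
--             return t + Rn
--     return Cn + Rn
-- ===== Notes on version B (the rewrite author's own statement) =====
-- stated objective: alternative
-- what changed: Replaces A's stateful greedy simulation (running fatigue budget, interleaved consume/restore steps, leftover activities counted one by one) with precomputed prefix-sum arrays compared against cumulative thresholds sumT[t+1]-D via a forward-only pointer, returning the closed forms t+Rn when stuck and Cn+Rn when all tiring activities complete.
-- outside the precondition, e.g. on count_activities(0, 2, 0, [5], []): A returns 0, B raises IndexError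
import Mathlib
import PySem

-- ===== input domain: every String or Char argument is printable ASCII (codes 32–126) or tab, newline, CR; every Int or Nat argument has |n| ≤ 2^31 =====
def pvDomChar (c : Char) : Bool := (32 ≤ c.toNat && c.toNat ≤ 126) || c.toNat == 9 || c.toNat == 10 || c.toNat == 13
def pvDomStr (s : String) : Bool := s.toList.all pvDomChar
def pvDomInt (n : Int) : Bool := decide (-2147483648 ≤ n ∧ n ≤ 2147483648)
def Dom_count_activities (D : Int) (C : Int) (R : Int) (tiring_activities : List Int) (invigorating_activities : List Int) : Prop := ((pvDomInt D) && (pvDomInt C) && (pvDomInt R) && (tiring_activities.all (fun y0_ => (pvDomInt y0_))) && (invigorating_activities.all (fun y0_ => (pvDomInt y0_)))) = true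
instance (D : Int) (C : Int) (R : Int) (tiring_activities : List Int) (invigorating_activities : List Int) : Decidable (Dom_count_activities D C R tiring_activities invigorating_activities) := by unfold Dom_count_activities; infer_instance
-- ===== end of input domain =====

-- B replaces A's stateful greedy simulation by precomputed prefix sums compared
-- against cumulative thresholds, with closed-form final counts; same return value on Pre_.

-- ===== PORT A =====
-- A's while-loop: state (D, t_idx, r_idx, total); the `none` arms are Python
-- IndexError, unreachable under Pre_count_activities.
def loopA (tiring invig : List Int) (C R : Int) (D t r total : Int) : Int :=
  if t < C ∨ r < R then
    if t < C then
      match PySem.List.pyGet? tiring t with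
      | none => total  -- IndexError in Python; unreachable under Pre_
      | some x =>
        if x ≤ D then loopA tiring invig C R (D - x) (t + 1) r (total + 1)
        else if r < R then
          match PySem.List.pyGet? invig r with
          | none => total  -- IndexError in Python; unreachable under Pre_
          | some y => loopA tiring invig C R (D + y) t (r + 1) (total + 1)
        else total
    else if r < R then
      match PySem.List.pyGet? invig r with
      | none => total  -- IndexError in Python; unreachable under Pre_
      | some y => loopA tiring invig C R (D + y) t (r + 1) (total + 1)
    else total
  else total
termination_by ((C - t).toNat + (R - r).toNat)
decreasing_by all_goals omega

def count_activities (D : Int) (C : Int) (R : Int) (tiring_activities : List Int) (invigorating_activities : List Int) : Int :=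
  loopA tiring_activities invigorating_activities C R D 0 0 0

-- ===== PORT B =====
-- Source B's prefix-sum builder: running total s, list acc (starts as [0]), append s after each element
def prefLoop (xs : List Int) : List Int → Int × List Int → Int × List Int
  | [], st => st
  | i :: is, (s, acc) =>
    let s' := s + PySem.List.pyGetD xs i 0   -- in range for every index Source B generates
    prefLoop xs is (s', acc ++ [s'])

def prefB (xs : List Int) (n : Int) : List Int :=
  (prefLoop xs (PySem.List.pyRange 0 n 1) (0, [0])).2

-- Source B's inner while: advance the pointer r while sumI[r] < X
def whileR (sumI : List Int) (Rn X r : Int) : Int :=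
  if r < Rn ∧ PySem.List.pyGetD sumI r 0 < X then whileR sumI Rn X (r + 1) else r
termination_by (Rn - r).toNat
decreasing_by omega

-- Source B's for-loop over the tiring indices, with closed-form returns t + Rn / Cn + Rn
def forT (sumT sumI : List Int) (D Cn Rn : Int) : List Int → Int → Int
  | [], _ => Cn + Rn
  | t :: ts, r =>
    let X := PySem.List.pyGetD sumT (t + 1) 0 - D
    let r' := whileR sumI Rn X r
    if PySem.List.pyGetD sumI r' 0 < X then t + Rn
    else forT sumT sumI D Cn Rn ts r'

def count_activities_alt (D : Int) (C : Int) (R : Int) (tiring_activities : List Int) (invigorating_activities : List Int) : Int :=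
  let Cn := if C > 0 then C else 0
  let Rn := if R > 0 then R else 0
  forT (prefB tiring_activities Cn) (prefB invigorating_activities Rn) D Cn Rn
    (PySem.List.pyRange 0 Cn 1) 0

-- ===== PRECONDITION & SPEC =====
-- Pre_ excludes inputs where C or R exceeds the length of its list: there A's
-- indexing usually raises IndexError, though A may still return if the greedy
-- run gets stuck before reaching the out-of-range index.
def Pre_count_activities (D : Int) (C : Int) (R : Int) (tiring_activities : List Int) (invigorating_activities : List Int) : Prop :=
  C ≤ (tiring_activities.length : Int) ∧ R ≤ (invigorating_activities.length : Int)
instance (D : Int) (C : Int) (R : Int) (tiring_activities : List Int) (invigorating_activities : List Int) : Decidable (Pre_count_activities D C R tiring_activities invigorating_activities) := by unfold Pre_count_activities; infer_instance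

def pvWitness_count_activities : Int × Int × Int × List Int × List Int := (5, 2, 1, [3, 4], [2])

def Spec_count_activities (D : Int) (C : Int) (R : Int) (tiring_activities : List Int) (invigorating_activities : List Int) (out : Int) : Prop := out = count_activities_alt D C R tiring_activities invigorating_activities
instance (D : Int) (C : Int) (R : Int) (tiring_activities : List Int) (invigorating_activities : List Int) (out : Int) : Decidable (Spec_count_activities D C R tiring_activities invigorating_activities out) := by unfold Spec_count_activities; infer_instance

-- ===== CLAIM (what is proved, stated in full; the proofs are below) =====
def Claim_equal_count_activities : Prop := ∀ (D : Int) (C : Int) (R : Int) (tiring_activities : List Int) (invigorating_activities : List Int), Dom_count_activities D C R tiring_activities invigorating_activities → Pre_count_activities D C R tiring_activities invigorating_activities → Spec_count_activities D C R tiring_activities invigorating_activities (count_activities D C R tiring_activities invigorating_activities)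

-- ===== LEMMAS AND PROOFS =====

-- tail: once all tiring activities are done, A consumes the remaining
-- invigorating activities one by one, adding max 0 (R - r) to the total
theorem loopA_tail (tiring invig : List Int) (C R : Int)
    (hR : R ≤ (invig.length : Int)) :
    ∀ (D t r total : Int), C ≤ t → 0 ≤ r →
      loopA tiring invig C R D t r total = total + max 0 (R - r) := by
  intro D t r total htC hr
  by_cases hrR : r < R
  · have hlen : r.toNat < invig.length := by omega
    have hy : PySem.List.pyGet? invig r = some invig[r.toNat] := by
      rw [PySem.List.pyGet?_of_nonneg _ hr]
      simp [List.getElem?_eq_getElem hlen]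
    rw [loopA]
    have hnt : ¬ t < C := by omega
    simp only [hnt, hrR, if_true, if_false, or_true, hy]
    have := loopA_tail tiring invig C R hR (D + invig[r.toNat]) t (r + 1) (total + 1) htC (by omega)
    rw [this]; omega
  · rw [loopA]
    have hnt : ¬ t < C := by omega
    simp only [hnt, hrR, or_self, if_false]
    omega
termination_by D t r total => (R - r).toNat
decreasing_by omega

-- prefLoop over a consecutive range, starting from the running sum of the first a elements
theorem prefLoop_spec (xs : List Int) : ∀ (a n : Int) (acc : List Int), 0 ≤ a →
    n ≤ (xs.length : Int) →
    (prefLoop xs (PySem.List.pyRange a n 1) ((xs.take a.toNat).sum, acc)).2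
      = acc ++ (PySem.List.pyRange a n 1).map (fun i => (xs.take (i.toNat + 1)).sum) := by
  intro a n acc ha hn
  by_cases h : a < n
  · rw [PySem.List.pyRange_one_cons h]
    have hlen : a.toNat < xs.length := by omega
    have halen : a < (xs.length : Int) := by omega
    have hget : PySem.List.pyGetD xs a 0 = xs[a.toNat] :=
      PySem.List.pyGetD_eq_getElem xs 0 ha halen
    have hsum : (xs.take a.toNat).sum + xs[a.toNat] = (xs.take (a.toNat + 1)).sum :=
      (List.sum_take_succ xs a.toNat hlen).symm
    rw [prefLoop]
    simp only [hget, hsum]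
    have hcast : (xs.take ((a + 1).toNat)).sum = (xs.take (a.toNat + 1)).sum := by
      have h1 : (a + 1).toNat = a.toNat + 1 := by omega
      rw [h1]
    have := prefLoop_spec xs (a + 1) n (acc ++ [(xs.take (a.toNat + 1)).sum]) (by omega) hn
    rw [hcast] at this
    rw [this, List.map_cons, List.append_assoc]
    rfl
  · rw [PySem.List.pyRange_one_eq_nil (by omega)]
    simp [prefLoop]
termination_by a n => (n - a).toNat
decreasing_by omega

-- the prefix-sum list, as a map over indices
theorem prefB_eq (xs : List Int) (n : Int) (hn0 : 0 ≤ n) (hn : n ≤ (xs.length : Int)) :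
    prefB xs n = (List.range (n.toNat + 1)).map (fun k => (xs.take k).sum) := by
  have key := prefLoop_spec xs 0 n [0] le_rfl hn
  have h0 : ((xs.take (0 : Int).toNat).sum : Int) = 0 := by simp
  rw [h0] at key
  have h2 : n = ((n.toNat : Nat) : Int) := by omega
  unfold prefB
  rw [key, h2, PySem.List.pyRange_zero_natCast, List.map_map, List.range_succ_eq_map, List.map_cons]
  simp only [Function.comp_def, Int.toNat_natCast, List.take_zero, List.sum_nil, List.map_map]
  rfl

-- lookup into the prefix-sum list
theorem prefB_get (xs : List Int) (n i : Int) (hn : n ≤ (xs.length : Int))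
    (h0 : 0 ≤ i) (hi : i ≤ n) :
    PySem.List.pyGetD (prefB xs n) i 0 = (xs.take i.toNat).sum := by
  rw [prefB_eq xs n (by omega) hn]
  have hlen : i.toNat < ((List.range (n.toNat + 1)).map (fun k => ((xs.take k).sum : Int))).length := by
    simp; omega
  rw [PySem.List.pyGetD_eq_getElem _ 0 h0 (by simpa using hlen)]
  simp

-- main invariant: A's loop at state (D - ΣT(t) + ΣI(r), t, r, t + r) equals B's
-- threshold scan over the remaining tiring indices with pointer r
theorem loopA_eq_forT (tir inv : List Int) (C R Cn Rn D : Int)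
    (hCn : Cn = max C 0) (hRn : Rn = max R 0)
    (hC : Cn ≤ (tir.length : Int)) (hR : Rn ≤ (inv.length : Int)) :
    ∀ (t r : Int), 0 ≤ t → t ≤ Cn → (C ≤ t → t = Cn) → 0 ≤ r → r ≤ Rn →
      loopA tir inv C R (D - (tir.take t.toNat).sum + (inv.take r.toNat).sum) t r (t + r)
        = forT (prefB tir Cn) (prefB inv Rn) D Cn Rn (PySem.List.pyRange t C 1) r := by
  intro t r ht htC hinv hr hrR
  by_cases htlt : t < C
  · have hCpos : Cn = C := by omega
    have hlen : t.toNat < tir.length := by omega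
    have hx : PySem.List.pyGet? tir t = some tir[t.toNat] := by
      rw [PySem.List.pyGet?_of_nonneg _ ht]
      simp [List.getElem?_eq_getElem hlen]
    have hsumT1 : PySem.List.pyGetD (prefB tir Cn) (t + 1) 0 = (tir.take (t.toNat + 1)).sum := by
      rw [prefB_get tir Cn (t + 1) hC (by omega) (by omega)]
      have : (t + 1).toNat = t.toNat + 1 := by omega
      rw [this]
    have hsumIr : PySem.List.pyGetD (prefB inv Rn) r 0 = (inv.take r.toNat).sum :=
      prefB_get inv Rn r hR hr hrR
    have hxval : tir[t.toNat] = (tir.take (t.toNat + 1)).sum - (tir.take t.toNat).sum := by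
      have := List.sum_take_succ tir t.toNat hlen; omega
    rw [PySem.List.pyRange_one_cons htlt, forT]
    simp only [hsumT1]
    by_cases haff : (inv.take r.toNat).sum ≥ (tir.take (t.toNat + 1)).sum - D
    · -- affordable now: A does tiring t; B's whileR does not move
      have hwr : whileR (prefB inv Rn) Rn ((tir.take (t.toNat + 1)).sum - D) r = r := by
        rw [whileR]
        simp only [hsumIr]
        have : ¬ (r < Rn ∧ (inv.take r.toNat).sum < (tir.take (t.toNat + 1)).sum - D) := by omega
        simp [this]
      rw [hwr]
      simp only [hsumIr]
      have hng : ¬ (inv.take r.toNat).sum < (tir.take (t.toNat + 1)).sum - D := by omega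
      simp only [hng, if_false]
      rw [loopA]
      simp only [htlt, true_or, if_true, hx]
      have hle : tir[t.toNat] ≤ D - (tir.take t.toNat).sum + (inv.take r.toNat).sum := by omega
      simp only [hle, if_true]
      have hst : D - (tir.take t.toNat).sum + (inv.take r.toNat).sum - tir[t.toNat]
          = D - (tir.take (t + 1).toNat).sum + (inv.take r.toNat).sum := by
        have : (t + 1).toNat = t.toNat + 1 := by omega
        rw [this]; omega
      rw [hst]
      have hrec := loopA_eq_forT tir inv C R Cn Rn D hCn hRn hC hR (t + 1) r
        (by omega) (by omega) (by omega) hr hrR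
      have : t + r + 1 = t + 1 + r := by ring
      rw [this, hrec]
    · by_cases hrlt : r < R
      · -- unaffordable and an invigorating activity remains: both advance r
        have hlenr : r.toNat < inv.length := by omega
        have hy : PySem.List.pyGet? inv r = some inv[r.toNat] := by
          rw [PySem.List.pyGet?_of_nonneg _ hr]
          simp [List.getElem?_eq_getElem hlenr]
        rw [loopA]
        simp only [htlt, true_or, if_true, hx]
        have hnle : ¬ tir[t.toNat] ≤ D - (tir.take t.toNat).sum + (inv.take r.toNat).sum := by omega
        simp only [hnle, if_false, hrlt, if_true, hy]
        have hst : D - (tir.take t.toNat).sum + (inv.take r.toNat).sum + inv[r.toNat]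
            = D - (tir.take t.toNat).sum + (inv.take (r + 1).toNat).sum := by
          have h1 : (r + 1).toNat = r.toNat + 1 := by omega
          have := List.sum_take_succ inv r.toNat hlenr
          rw [h1]; omega
        rw [hst]
        have hrec := loopA_eq_forT tir inv C R Cn Rn D hCn hRn hC hR t (r + 1)
          ht htC hinv (by omega) (by omega)
        have harr : t + r + 1 = t + (r + 1) := by ring
        rw [harr, hrec, PySem.List.pyRange_one_cons htlt, forT]
        simp only [hsumT1]
        -- whileR takes exactly one step here
        have hwstep : whileR (prefB inv Rn) Rn ((tir.take (t.toNat + 1)).sum - D) r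
            = whileR (prefB inv Rn) Rn ((tir.take (t.toNat + 1)).sum - D) (r + 1) := by
          rw [whileR]
          simp only [hsumIr]
          have : r < Rn ∧ (inv.take r.toNat).sum < (tir.take (t.toNat + 1)).sum - D := by omega
          simp [this]
        rw [hwstep]
      · -- stuck: r = Rn, A breaks with total t + r; B returns t + Rn
        have hreq : r = Rn := by omega
        rw [loopA]
        simp only [htlt, true_or, if_true, hx]
        have hnle : ¬ tir[t.toNat] ≤ D - (tir.take t.toNat).sum + (inv.take r.toNat).sum := by omega
        simp only [hnle, if_false, hrlt, if_false]
        have hwr : whileR (prefB inv Rn) Rn ((tir.take (t.toNat + 1)).sum - D) r = r := by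
          rw [whileR]
          have hno : ¬ (r < Rn ∧ PySem.List.pyGetD (prefB inv Rn) r 0 < (tir.take (t.toNat + 1)).sum - D) := by
            intro hcontra; omega
          simp [hno]
        rw [hwr]
        simp only [hsumIr]
        have hlt : (inv.take r.toNat).sum < (tir.take (t.toNat + 1)).sum - D := by omega
        simp only [hlt, if_true]
        omega
  · -- tiring indices exhausted: closed-form tails agree
    rw [PySem.List.pyRange_one_eq_nil (by omega), forT]
    rw [loopA_tail tir inv C R (by omega) _ t r (t + r) (by omega) hr]
    omega
termination_by t r => ((C - t).toNat + (Rn - r).toNat)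
decreasing_by all_goals omega

-- ===== VERDICT (by name: the statement is the Claim_ definition above) =====
theorem count_activities_spec : Claim_equal_count_activities := by
  intro D C R tir inv _ hpre
  unfold Spec_count_activities count_activities count_activities_alt
  have hCn : (if C > 0 then C else 0) = max C 0 := by omega
  have hRn : (if R > 0 then R else 0) = max R 0 := by omega
  simp only [hCn, hRn]
  have hC : max C 0 ≤ (tir.length : Int) := by
    have := hpre.1; omega
  have hR : max R 0 ≤ (inv.length : Int) := by
    have := hpre.2; omega
  have hrng : PySem.List.pyRange 0 C 1 = PySem.List.pyRange 0 (max C 0) 1 := by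
    by_cases h : 0 < C
    · congr 1; omega
    · rw [PySem.List.pyRange_one_eq_nil (by omega), PySem.List.pyRange_one_eq_nil (by omega)]
  have := loopA_eq_forT tir inv C R (max C 0) (max R 0) D rfl rfl hC hR 0 0
    le_rfl (by omega) (by omega) le_rfl (by omega)
  simp only [Int.toNat_zero, List.take_zero, List.sum_nil, add_zero, sub_zero] at this
  rw [this, hrng]
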